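-- pv_equiv track=rewrite | github.com/LachlanMayes/Maths | Binary.py | Binary_negation
-- ===== SOURCE A (Python) =====
-- def decimal_to_binary_list(num, bit_size=8):
--     """Helper to convert decimal to a fixed-width binary list (LSB first)."""
--     bits = []
--     temp = abs(num)
--     for _ in range(bit_size):
--         bits.append(temp % 2)
--         temp //= 2
--     return bits
--
-- def Binary_negation(number, bit_size=8):
--     """Returns the two's complement of a number as a list (LSB first)."""
--     pos_bits = decimal_to_binary_list(abs(number), bit_size)
--     neg_bits = []
--     found_first_one = False
--
--     for bit in pos_bits:
--         if not found_first_one: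
--             neg_bits.append(bit)
--             if bit == 1:
--                 found_first_one = True
--         else:
--             # Flip the bits after the first '1'
--             neg_bits.append(1 if bit == 0 else 0)
--     return neg_bits
-- ===== SOURCE B (Python) =====
-- def Binary_negation(number, bit_size=8):
--     """Two's complement in one early-exit pass: extract bits of -|number| directly
--     (Python's floor division sign-extends the quotient to 0 or -1), then pad
--     the remaining width with the sign bit."""
--     m = -abs(number)
--     out = []
--     while len(out) < bit_size and m != 0 and m != -1:
--         m, r = divmod(m, 2)
--         out.append(r)
--     pad = 0 if m == 0 else 1
--     out += [pad] * (bit_size - len(out))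
--     return out
-- ===== Notes on version B (the rewrite author's own statement) =====
-- stated objective: faster
-- what changed: Replaces A's two staged passes (helper builds the positive bit list, then a copy-until-first-1-then-flip state machine scans it) with a single early-exit loop that pulls bits directly off -|number| via floor divmod, stopping once the value sign-extends to 0 or -1 and padding the remaining width with the sign bit in one list-repeat step.
import Mathlib
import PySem

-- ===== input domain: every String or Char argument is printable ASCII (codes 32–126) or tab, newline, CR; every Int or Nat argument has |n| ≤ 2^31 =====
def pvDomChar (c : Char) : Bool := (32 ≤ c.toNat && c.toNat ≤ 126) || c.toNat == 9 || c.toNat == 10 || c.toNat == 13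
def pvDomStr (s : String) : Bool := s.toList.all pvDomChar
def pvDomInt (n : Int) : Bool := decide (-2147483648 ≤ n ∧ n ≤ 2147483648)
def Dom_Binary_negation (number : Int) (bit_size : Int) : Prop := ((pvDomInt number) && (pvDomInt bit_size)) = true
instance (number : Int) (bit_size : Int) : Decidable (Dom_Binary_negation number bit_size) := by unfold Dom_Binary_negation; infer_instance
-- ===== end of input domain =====

-- B replaces A's two passes (positive bit list, then a copy-until-first-1-then-flip scan)
-- by a single early-exit loop extracting bits of -|number| with floor divmod and padding
-- the remaining width with the sign bit: a genuinely different decomposition.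

-- ===== PORT A =====
-- helper decimal_to_binary_list: loop over range(bit_size), state (bits, temp)
def pvStepBitsA (st : List Int × Int) (_ : Int) : List Int × Int :=
  (st.1 ++ [PySem.Int.mod st.2 2], PySem.Int.floordiv st.2 2)

def decToBitsA (num : Int) (bit_size : Int) : List Int :=
  ((PySem.List.pyRange 0 bit_size 1).foldl pvStepBitsA ([], |num|)).1

-- loop over pos_bits, state (neg_bits, found_first_one)
def pvStepA (st : List Int × Bool) (bit : Int) : List Int × Bool :=
  if !st.2 then
    (st.1 ++ [bit], bit == 1)
  else
    (st.1 ++ [if bit == 0 then (1 : Int) else 0], st.2)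

def Binary_negation (number : Int) (bit_size : Int) : List Int :=
  let pos_bits := decToBitsA |number| bit_size
  ((pos_bits.foldl pvStepA ([], false))).1

-- ===== PORT B =====
-- while len(out) < bit_size and m != 0 and m != -1: m, r = divmod(m, 2); out.append(r)
-- (fuel = bit_size - len(out), the loop's own bound; returns (final m, out))
def pvLoopB : Nat → Int → List Int → Int × List Int
  | 0, m, out => (m, out)
  | n+1, m, out =>
    if m == 0 || m == -1 then (m, out)
    else pvLoopB n (PySem.Int.floordiv m 2) (out ++ [PySem.Int.mod m 2])

def Binary_negation_alt (number : Int) (bit_size : Int) : List Int :=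
  let p := pvLoopB bit_size.toNat (-(|number|)) []
  let pad : Int := if p.1 == 0 then 0 else 1
  p.2 ++ List.replicate (bit_size.toNat - p.2.length) pad

-- ===== PRECONDITION & SPEC =====
def Spec_Binary_negation (number : Int) (bit_size : Int) (out : List Int) : Prop := out = Binary_negation_alt number bit_size
instance (number : Int) (bit_size : Int) (out : List Int) : Decidable (Spec_Binary_negation number bit_size out) := by unfold Spec_Binary_negation; infer_instance

-- ===== CLAIM (what is proved, stated in full; the proofs are below) =====
def Claim_equal_Binary_negation : Prop := ∀ (number : Int) (bit_size : Int), Dom_Binary_negation number bit_size → Spec_Binary_negation number bit_size (Binary_negation number bit_size)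

-- ===== LEMMAS AND PROOFS =====

-- abstract LSB-first bit list of an integer (floor division, truncated to k bits)
def pvBinBits : Int → Nat → List Int
  | _, 0 => []
  | t, k+1 => t % 2 :: pvBinBits (t / 2) k

-- A's helper loop produces pvBinBits (only the list component matters)
lemma pv_bitsA (l : List Int) : ∀ (acc : List Int) (t : Int),
    (l.foldl pvStepBitsA (acc, t)).1 = acc ++ pvBinBits t l.length := by
  induction l with
  | nil => intro acc t; simp [pvBinBits]
  | cons x l ih =>
    intro acc t
    have hm : PySem.Int.mod t 2 = t % 2 := PySem.Int.mod_eq_emod_of_pos (by omega)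
    have hd : PySem.Int.floordiv t 2 = t / 2 := PySem.Int.floordiv_eq_ediv_of_pos (by omega)
    simp only [List.foldl_cons, pvStepBitsA, hm, hd, ih, List.length_cons, pvBinBits,
      List.append_assoc, List.singleton_append]

-- A's state machine: from the not-yet-found state it produces the bits of -t,
-- from the found (flipping) state the bits of -1-t
lemma pv_machine : ∀ (k : Nat) (t : Int) (acc : List Int),
    ((pvBinBits t k).foldl pvStepA (acc, false)).1 = acc ++ pvBinBits (-t) k ∧
    ((pvBinBits t k).foldl pvStepA (acc, true)).1 = acc ++ pvBinBits (-1 - t) k := by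
  intro k
  induction k with
  | zero => intro t acc; simp [pvBinBits]
  | succ k ih =>
    intro t acc
    have h2 : t % 2 = 0 ∨ t % 2 = 1 := by omega
    have s0f : ∀ a : List Int, pvStepA (a, false) 0 = (a ++ [0], false) := by
      intro a; simp [pvStepA]
    have s1f : ∀ a : List Int, pvStepA (a, false) 1 = (a ++ [1], true) := by
      intro a; simp [pvStepA]
    have s0t : ∀ a : List Int, pvStepA (a, true) 0 = (a ++ [1], true) := by
      intro a; simp [pvStepA]
    have s1t : ∀ a : List Int, pvStepA (a, true) 1 = (a ++ [0], true) := by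
      intro a; simp [pvStepA]
    rcases h2 with h | h
    · have hneg : (-t) % 2 = 0 := by omega
      have hnegd : (-t) / 2 = -(t / 2) := by omega
      have hflip : (-1 - t) % 2 = 1 := by omega
      have hflipd : (-1 - t) / 2 = -1 - t / 2 := by omega
      constructor
      · simp only [pvBinBits, List.foldl_cons, h, hneg, hnegd, s0f]
        conv_rhs => rw [List.append_cons]
        exact (ih (t / 2) (acc ++ [0])).1
      · simp only [pvBinBits, List.foldl_cons, h, hflip, hflipd, s0t]
        conv_rhs => rw [List.append_cons]
        exact (ih (t / 2) (acc ++ [1])).2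
    · have hneg : (-t) % 2 = 1 := by omega
      have hnegd : (-t) / 2 = -1 - t / 2 := by omega
      have hflip : (-1 - t) % 2 = 0 := by omega
      have hflipd : (-1 - t) / 2 = -1 - t / 2 := by omega
      constructor
      · simp only [pvBinBits, List.foldl_cons, h, hneg, hnegd, s1f]
        conv_rhs => rw [List.append_cons]
        exact (ih (t / 2) (acc ++ [1])).2
      · simp only [pvBinBits, List.foldl_cons, h, hflip, hflipd, s1t]
        conv_rhs => rw [List.append_cons]
        exact (ih (t / 2) (acc ++ [0])).2

lemma pv_binBits_zero : ∀ (k : Nat), pvBinBits 0 k = List.replicate k 0 := by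
  intro k
  induction k with
  | zero => rfl
  | succ k ih => simp [pvBinBits, ih, List.replicate_succ]

lemma pv_binBits_negOne : ∀ (k : Nat), pvBinBits (-1) k = List.replicate k 1 := by
  intro k
  induction k with
  | zero => rfl
  | succ k ih =>
    have h1 : (-1 : Int) % 2 = 1 := by omega
    have h2 : (-1 : Int) / 2 = -1 := by omega
    simp [pvBinBits, h1, h2, ih, List.replicate_succ]

-- B's early-exit loop plus sign padding produces pvBinBits
lemma pv_loopB : ∀ (n : Nat) (m : Int) (out : List Int),
    (pvLoopB n m out).2 ++
      List.replicate ((out.length + n) - (pvLoopB n m out).2.length)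
        (if (pvLoopB n m out).1 == 0 then (0 : Int) else 1)
    = out ++ pvBinBits m n := by
  intro n
  induction n with
  | zero => intro m out; simp [pvLoopB, pvBinBits]
  | succ n ih =>
    intro m out
    by_cases hm0 : m = 0
    · subst hm0
      simp [pvLoopB, pv_binBits_zero]
    · by_cases hm1 : m = -1
      · subst hm1
        have hc : ((-1 : Int) == 0 || (-1 : Int) == -1) = true := by decide
        have hpad : ((-1 : Int) == 0) = false := by decide
        simp only [pvLoopB, hc, if_true]
        simp [hpad, pv_binBits_negOne]
      · have hc : ((m : Int) == 0 || m == -1) = false := by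
          simp [hm0, hm1]
        have hm : PySem.Int.mod m 2 = m % 2 := PySem.Int.mod_eq_emod_of_pos (by omega)
        have hd : PySem.Int.floordiv m 2 = m / 2 := PySem.Int.floordiv_eq_ediv_of_pos (by omega)
        simp only [pvLoopB, hc, Bool.false_eq_true, if_false, hm, hd]
        have hlen : (out ++ [m % 2]).length + n = out.length + (n + 1) := by simp; omega
        have h := ih (m / 2) (out ++ [m % 2])
        rw [hlen] at h
        rw [h, List.append_assoc, List.singleton_append]
        rfl

-- ===== VERDICT (by name: the statement is the Claim_ definition above) =====
theorem Binary_negation_spec : Claim_equal_Binary_negation := by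
  intro number bit_size _
  unfold Spec_Binary_negation Binary_negation Binary_negation_alt decToBitsA
  set t : Int := |(|number|)| with ht
  set k : Nat := bit_size.toNat with hk
  have hlen : (PySem.List.pyRange 0 bit_size 1).length = k := by
    rw [PySem.List.length_pyRange_one]; omega
  have hA : ((PySem.List.pyRange 0 bit_size 1).foldl pvStepBitsA ([], t)).1
      = pvBinBits t k := by
    rw [pv_bitsA, hlen]; simp
  rw [hA, (pv_machine k t []).1, List.nil_append]
  -- B side: the early-exit loop with sign padding yields pvBinBits (-t) k
  have hB := pv_loopB k (-(|number|)) []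
  simp only [List.length_nil, Nat.zero_add, List.nil_append] at hB
  rw [ht, abs_abs]
  simpa using hB.symm
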